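-- pv_equiv track=rewrite | github.com/mrahimali/python_dsa | 01_digit_extraction.py | digit_extract
-- ===== SOURCE A (Python) =====
-- def digit_extract(num):
--     ans = []
--     n = num
--     while n>0:
--         last_digit = n%10
--         ans.append(last_digit)
--         n = n//10
--     return ans
-- ===== SOURCE B (Python) =====
-- def digit_extract(num):
--     return [int(c) for c in reversed(str(num))] if num > 0 else []
-- ===== Notes on version B (the rewrite author's own statement) =====
-- stated objective: idiomatic
-- what changed: Replaces the explicit mod/floordiv while-loop with a reversed traversal of the decimal string produced by str(num), mapping each character back to an int.
import Mathlib
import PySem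

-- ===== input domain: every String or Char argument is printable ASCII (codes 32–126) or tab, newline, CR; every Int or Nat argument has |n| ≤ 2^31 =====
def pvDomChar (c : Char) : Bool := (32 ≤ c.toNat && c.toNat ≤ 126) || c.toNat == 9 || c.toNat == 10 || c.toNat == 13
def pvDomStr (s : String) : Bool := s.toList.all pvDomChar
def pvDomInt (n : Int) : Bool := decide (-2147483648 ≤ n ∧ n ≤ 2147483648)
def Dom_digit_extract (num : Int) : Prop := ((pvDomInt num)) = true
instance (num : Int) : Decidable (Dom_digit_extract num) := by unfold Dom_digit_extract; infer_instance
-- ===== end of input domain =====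

-- B replaces the mod/floordiv extraction loop with a reversed traversal of str(num); same values, no speed claim.

-- ===== PORT A =====
-- the while-loop of A: while n>0: ans.append(n%10); n = n//10
def digit_extract_go (n : Int) (ans : List Int) : List Int :=
  if h : n > 0 then
    digit_extract_go (PySem.Int.floordiv n 10) (ans ++ [PySem.Int.mod n 10])
  else ans
termination_by n.toNat
decreasing_by
  rw [PySem.Int.floordiv_eq_ediv_of_pos (by omega : (0:Int) < 10)]
  omega

def digit_extract (num : Int) : List Int :=
  digit_extract_go num []

-- ===== PORT B =====
-- int(c) for a single character c
def digit_extract_charInt (c : Char) : Int := (PySem.Int.ofChars? [c]).getD 0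

def digit_extract_alt (num : Int) : List Int :=
  if num > 0 then
    ((PySem.Int.toStr num).toList.reverse).map digit_extract_charInt
  else []

-- ===== PRECONDITION & SPEC =====
def Spec_digit_extract (num : Int) (out : List Int) : Prop := out = digit_extract_alt num
instance (num : Int) (out : List Int) : Decidable (Spec_digit_extract num out) := by unfold Spec_digit_extract; infer_instance

-- ===== CLAIM (what is proved, stated in full; the proofs are below) =====
def Claim_equal_digit_extract : Prop := ∀ (num : Int), Dom_digit_extract num → Spec_digit_extract num (digit_extract num)

-- ===== LEMMAS AND PROOFS =====

-- least-significant-first digit list of a natural number (proof-side reference object)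
def pvDigitsLSD (n : Nat) : List Int :=
  if h : n = 0 then [] else ((n % 10 : Nat) : Int) :: pvDigitsLSD (n / 10)
termination_by n
decreasing_by omega

-- most-significant-first digit characters of a positive natural number (proof-side reference object)
def pvRep (n : Nat) : List Char :=
  if h : n = 0 then [] else pvRep (n / 10) ++ [Nat.digitChar (n % 10)]
termination_by n
decreasing_by omega

lemma digit_extract_go_eq (n : Int) (ans : List Int) :
    digit_extract_go n ans = ans ++ pvDigitsLSD n.toNat := by
  induction n, ans using digit_extract_go.induct with
  | case1 n ans h ih =>
    rw [digit_extract_go, dif_pos h, ih]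
    rw [PySem.Int.floordiv_eq_ediv_of_pos (by omega : (0:Int) < 10),
        PySem.Int.mod_eq_emod_of_pos (by omega : (0:Int) < 10)]
    have hn : n.toNat ≠ 0 := by omega
    conv_rhs => rw [pvDigitsLSD]
    rw [dif_neg hn]
    have h1 : (n / 10).toNat = n.toNat / 10 := by omega
    have h2 : n % 10 = ((n.toNat % 10 : Nat) : Int) := by omega
    simp [h1, h2]
  | case2 n ans h =>
    rw [digit_extract_go, dif_neg h]
    have : n.toNat = 0 := by omega
    simp [this, pvDigitsLSD]

lemma toDigitsCore_eq_pvRep (f : Nat) :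
    ∀ (n : Nat) (l : List Char), n ≤ f →
      Nat.toDigitsCore 10 (f + 1) n l = (if n = 0 then ['0'] else pvRep n) ++ l := by
  induction f with
  | zero =>
    intro n l hn
    have : n = 0 := by omega
    subst this
    rw [Nat.toDigitsCore.eq_def]
    simp
    decide
  | succ f ih =>
    intro n l hn
    rw [Nat.toDigitsCore.eq_def]
    simp only []
    by_cases h : n / 10 = 0
    · rw [if_pos h]
      by_cases h0 : n = 0
      · subst h0
        simp
        decide
      · rw [if_neg h0]
        conv_rhs => rw [pvRep]
        rw [dif_neg h0, h, pvRep]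
        simp
    · rw [if_neg h]
      have hle : n / 10 ≤ f := by omega
      rw [ih (n / 10) _ hle, if_neg h]
      have h0 : n ≠ 0 := by omega
      conv_rhs => rw [pvRep]
      rw [if_neg h0, dif_neg h0, List.append_assoc, List.singleton_append]

lemma toDigits_eq_pvRep (n : Nat) (h : n ≠ 0) : Nat.toDigits 10 n = pvRep n := by
  unfold Nat.toDigits
  rw [toDigitsCore_eq_pvRep n n [] (le_refl n), if_neg h]
  simp

lemma charInt_digitChar (d : Nat) (hd : d < 10) :
    digit_extract_charInt (Nat.digitChar d) = (d : Int) := by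
  interval_cases d <;> decide

lemma pvRep_reverse_map (n : Nat) :
    (pvRep n).reverse.map digit_extract_charInt = pvDigitsLSD n := by
  induction n using pvRep.induct with
  | case1 => rw [pvRep, dif_pos rfl, pvDigitsLSD, dif_pos rfl]; simp
  | case2 n h ih =>
    rw [pvRep, dif_neg h, pvDigitsLSD, dif_neg h]
    simp only [List.reverse_append, List.reverse_cons, List.reverse_nil, List.nil_append,
      List.singleton_append, List.map_cons, ih]
    rw [charInt_digitChar (n % 10) (Nat.mod_lt n (by omega))]

-- ===== VERDICT (by name: the statement is the Claim_ definition above) =====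
theorem digit_extract_spec : Claim_equal_digit_extract := by
  intro num _
  unfold Spec_digit_extract digit_extract digit_extract_alt
  rw [digit_extract_go_eq, List.nil_append]
  by_cases h : num > 0
  · rw [if_pos h, PySem.Int.toList_toStr]
    unfold PySem.Int.toChars
    rw [if_neg (by omega : ¬ num < 0)]
    rw [toDigits_eq_pvRep num.toNat (by omega), pvRep_reverse_map]
  · rw [if_neg h]
    have : num.toNat = 0 := by omega
    rw [this, pvDigitsLSD]
    simp
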